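-- pv_equiv track=rewrite | github.com/kazu44ttaka/MaAI | example/nod_para/compare_three_approaches.py | _find_active_regions
-- ===== SOURCE A (Python) =====
-- def _find_active_regions(arr):
--     """1が連続する区間を [(start, end), ...] で返す (endは排他)"""
--     regions = []
--     in_region = False
--     start = 0
--     for i in range(len(arr)):
--         if arr[i] > 0 and not in_region:
--             start = i
--             in_region = True
--         elif arr[i] <= 0 and in_region:
--             regions.append((start, i))
--             in_region = False
--     if in_region:
--         regions.append((start, len(arr)))
--     return regions
-- ===== SOURCE B (Python) =====
-- def _find_active_regions(arr):
--     """1が連続する区間を [(start, end), ...] で返す (endは排他)"""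
--     regions = []
--     n = len(arr)
--     i = 0
--     while i < n:
--         if arr[i] > 0:
--             j = i + 1
--             while j < n and arr[j] > 0:
--                 j += 1
--             regions.append((i, j))
--             i = j
--         else:
--             i += 1
--     return regions
-- ===== Notes on version B (the rewrite author's own statement) =====
-- stated objective: alternative
-- what changed: Replaces the boolean in_region state machine with a two-pointer scan that, at each positive element, advances an inner pointer to the end of the run and emits the interval directly.
import Mathlib
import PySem

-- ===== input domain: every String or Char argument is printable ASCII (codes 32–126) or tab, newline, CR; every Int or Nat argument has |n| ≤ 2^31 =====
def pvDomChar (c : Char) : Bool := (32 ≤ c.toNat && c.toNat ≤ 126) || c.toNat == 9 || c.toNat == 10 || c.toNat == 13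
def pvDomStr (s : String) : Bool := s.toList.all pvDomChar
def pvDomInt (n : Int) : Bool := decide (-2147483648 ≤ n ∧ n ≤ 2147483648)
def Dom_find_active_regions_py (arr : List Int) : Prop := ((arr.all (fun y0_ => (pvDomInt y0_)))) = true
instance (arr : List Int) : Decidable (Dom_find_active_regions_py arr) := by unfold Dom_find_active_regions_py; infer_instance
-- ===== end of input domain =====

-- B replaces A's boolean in_region state machine by a two-pointer scan that emits each positive run directly (alternative decomposition, same cost).


-- ===== PORT A =====
-- state: (regions, in_region, start)
def stepA (arr : List Int) (s : List (Int × Int) × Bool × Int) (i : Int) :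
    List (Int × Int) × Bool × Int :=
  let x := PySem.List.pyGetD arr i 0
  if x > 0 ∧ s.2.1 = false then (s.1, true, i)
  else if x ≤ 0 ∧ s.2.1 = true then (s.1 ++ [(s.2.2, i)], false, s.2.2)
  else s

def find_active_regions_py (arr : List Int) : List (Int × Int) :=
  let s := (PySem.List.pyRange 0 (arr.length : Int) 1).foldl (stepA arr) ([], false, 0)
  if s.2.1 then s.1 ++ [(s.2.2, (arr.length : Int))] else s.1

-- ===== PORT B =====
-- length of the leading run of positive values (Source B's inner `while j < n and arr[j] > 0`)
def posRun : List Int → Nat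
  | [] => 0
  | x :: xs => if x > 0 then posRun xs + 1 else 0

-- Source B's outer loop: skip a non-positive element, or emit the whole positive run and jump past it
def altGo : List Int → Int → List (Int × Int)
  | [], _ => []
  | x :: xs, idx =>
    if x > 0 then
      (idx, idx + 1 + (posRun xs : Int)) :: altGo (xs.drop (posRun xs)) (idx + 1 + (posRun xs : Int))
    else
      altGo xs (idx + 1)
termination_by xs _ => xs.length
decreasing_by
  all_goals simp

def find_active_regions_py_alt (arr : List Int) : List (Int × Int) := altGo arr 0

-- ===== PRECONDITION & SPEC =====
def Spec_find_active_regions_py (arr : List Int) (out : List (Int × Int)) : Prop := out = find_active_regions_py_alt arr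
instance (arr : List Int) (out : List (Int × Int)) : Decidable (Spec_find_active_regions_py arr out) := by unfold Spec_find_active_regions_py; infer_instance

-- ===== CLAIM (what is proved, stated in full; the proofs are below) =====
def Claim_equal_find_active_regions_py : Prop := ∀ (arr : List Int), Dom_find_active_regions_py arr → Spec_find_active_regions_py arr (find_active_regions_py arr)

-- ===== LEMMAS AND PROOFS =====

-- equation lemmas for altGo (well-founded recursion, so simp cannot unfold it directly)
lemma altGo_nil (idx : Int) : altGo [] idx = [] := by rw [altGo]

lemma altGo_cons_pos (x : Int) (xs : List Int) (idx : Int) (hx : x > 0) :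
    altGo (x :: xs) idx =
      (idx, idx + 1 + (posRun xs : Int)) :: altGo (xs.drop (posRun xs)) (idx + 1 + (posRun xs : Int)) := by
  rw [altGo]; simp [hx]

lemma altGo_cons_neg (x : Int) (xs : List Int) (idx : Int) (hx : ¬ x > 0) :
    altGo (x :: xs) idx = altGo xs (idx + 1) := by
  rw [altGo]; simp [hx]

-- value-level step (what stepA does once the index has been resolved to its element)
def stepV (x i : Int) (s : List (Int × Int) × Bool × Int) : List (Int × Int) × Bool × Int :=
  if x > 0 ∧ s.2.1 = false then (s.1, true, i)
  else if x ≤ 0 ∧ s.2.1 = true then (s.1 ++ [(s.2.2, i)], false, s.2.2)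
  else s

-- A's loop as structural recursion over the suffix not yet processed
def loopA : List Int → Int → List (Int × Int) × Bool × Int → List (Int × Int) × Bool × Int
  | [], _, s => s
  | x :: xs, i, s => loopA xs (i + 1) (stepV x i s)

def finishA (s : List (Int × Int) × Bool × Int) (n : Int) : List (Int × Int) :=
  if s.2.1 then s.1 ++ [(s.2.2, n)] else s.1

lemma stepA_at (pre : List Int) (x : Int) (xs : List Int) (s) :
    stepA (pre ++ x :: xs) s (pre.length : Int) = stepV x (pre.length : Int) s := by
  have hx : PySem.List.pyGetD (pre ++ x :: xs) (pre.length : Int) 0 = x := by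
    rw [PySem.List.pyGetD_natCast]
    simp [List.getD]
  simp [stepA, stepV, hx]

lemma bridge (xs : List Int) : ∀ (pre : List Int) (s),
    (PySem.List.pyRange (pre.length : Int) (((pre.length + xs.length : Nat) : Nat) : Int) 1).foldl
      (stepA (pre ++ xs)) s = loopA xs (pre.length : Int) s := by
  induction xs with
  | nil => intro pre s; simp [PySem.List.pyRange, loopA]
  | cons x xs ih =>
    intro pre s
    have hlt : (pre.length : Int) < ((pre.length + (x :: xs).length : Nat) : Int) := by
      simp
    rw [PySem.List.pyRange_one_cons hlt, List.foldl_cons, stepA_at]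
    have := ih (pre ++ [x]) (stepV x (pre.length : Int) s)
    simp only [List.length_append, List.length_cons, List.length_nil] at this ⊢
    have harr : pre ++ [x] ++ xs = pre ++ x :: xs := by simp
    rw [harr] at this
    have hc : ((pre.length + 1 : Nat) : Int) = (pre.length : Int) + 1 := by push_cast; ring
    rw [hc] at this
    have hb : pre.length + 1 + xs.length = pre.length + (xs.length + 1) := by omega
    rw [hb] at this
    rw [this]
    rfl

-- the joint invariant: closed (in_region = false) and open (in_region = true) states
lemma main_inv (xs : List Int) : ∀ (k : Int) (regs : List (Int × Int)) (st : Int),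
    (finishA (loopA xs k (regs, false, st)) (k + (xs.length : Int)) = regs ++ altGo xs k) ∧
    (finishA (loopA xs k (regs, true, st)) (k + (xs.length : Int)) =
      regs ++ [(st, k + (posRun xs : Int))] ++ altGo (xs.drop (posRun xs)) (k + (posRun xs : Int))) := by
  induction xs with
  | nil =>
    intro k regs st
    simp [loopA, finishA, altGo_nil, posRun]
  | cons x xs ih =>
    intro k regs st
    have hk : k + (((x :: xs).length : Nat) : Int) = (k + 1) + (xs.length : Int) := by
      simp; ring
    constructor
    · by_cases hx : x > 0
      · have h2 := (ih (k + 1) regs k).2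
        simp only [loopA, stepV]
        rw [if_pos ⟨hx, trivial⟩, altGo_cons_pos x xs k hx, hk, h2]
        simp
      · have h1 := (ih (k + 1) regs st).1
        simp only [loopA, stepV]
        rw [if_neg (by simp [hx]), if_neg (by simp), altGo_cons_neg x xs k hx, hk, h1]
    · by_cases hx : x > 0
      · have h2 := (ih (k + 1) regs st).2
        simp only [loopA, stepV]
        rw [if_neg (by simp), if_neg (by simp [not_le.mpr hx]), hk, h2]
        have hpr : posRun (x :: xs) = posRun xs + 1 := by simp [posRun, hx]
        rw [hpr]
        have hd : (x :: xs).drop (posRun xs + 1) = xs.drop (posRun xs) := rfl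
        rw [hd]
        have hc : k + ((posRun xs + 1 : Nat) : Int) = (k + 1) + (posRun xs : Int) := by
          push_cast; ring
        rw [hc]
      · have h1 := (ih (k + 1) (regs ++ [(st, k)]) st).1
        simp only [loopA, stepV]
        rw [if_neg (by simp [hx]), if_pos ⟨not_lt.mp hx, trivial⟩, hk, h1]
        have hpr : posRun (x :: xs) = 0 := by simp [posRun, hx]
        rw [hpr]
        simp [altGo_cons_neg x xs k hx]

-- ===== VERDICT (by name: the statement is the Claim_ definition above) =====
theorem find_active_regions_py_spec : Claim_equal_find_active_regions_py := by
  intro arr _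
  unfold Spec_find_active_regions_py find_active_regions_py find_active_regions_py_alt
  have hb := bridge arr [] ([], false, 0)
  simp only [List.length_nil, List.nil_append, Nat.zero_add, Nat.cast_zero] at hb
  rw [hb]
  have := (main_inv arr 0 [] 0).1
  simp only [zero_add, List.nil_append] at this
  rw [← this]
  rfl
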